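-- pv_equiv track=rewrite | github.com/kkamara/playground | py/highest_scoring_word/main.py | execute
-- ===== SOURCE A (Python) =====
-- import string
--
-- def get_word_count(collection):
--     for word in collection:
--         count = 0
--         for letter in word:
--             count += int(string.ascii_lowercase.index(letter)) + 1
--         yield {'word':word,'count':count}
--
-- def execute(x):
--     col = x.split(' ')
--     d = {}
--     gen = get_word_count(col)
--     r = ''
--     count = 0
--     for wordcnt in gen:
--         if wordcnt['count'] > count:
--             r = wordcnt['word']
--             count = wordcnt['count']
--     return r
-- ===== SOURCE B (Python) =====
-- import string
--
--
-- def word_score(word):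
--     return sum(string.ascii_lowercase.index(letter) + 1 for letter in word)
--
--
-- def execute(x):
--     return sorted(x.split(' '), key=word_score, reverse=True)[0]
-- ===== Notes on version B (the rewrite author's own statement) =====
-- stated objective: alternative
-- what changed: Replaces A's generator-plus-running-max scan (strict > keeps the first max) with a stable descending sort of the word list by letter score and taking its first element; Pre_ excludes inputs containing a character other than a space or a lowercase ASCII letter, on which A raises ValueError.
import Mathlib
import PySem

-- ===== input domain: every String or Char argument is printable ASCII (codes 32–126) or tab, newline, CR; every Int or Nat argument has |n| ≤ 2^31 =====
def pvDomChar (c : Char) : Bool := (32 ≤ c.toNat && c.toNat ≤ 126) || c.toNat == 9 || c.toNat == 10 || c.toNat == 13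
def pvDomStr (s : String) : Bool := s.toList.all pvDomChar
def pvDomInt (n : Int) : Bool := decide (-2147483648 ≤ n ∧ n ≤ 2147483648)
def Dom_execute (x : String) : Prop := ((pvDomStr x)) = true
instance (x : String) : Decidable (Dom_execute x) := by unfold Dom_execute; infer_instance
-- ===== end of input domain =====

-- B replaces A's running-max scan with a stable descending sort by letter score, taking its head.

-- shared constant: string.ascii_lowercase
def lowercaseChars : List Char := "abcdefghijklmnopqrstuvwxyz".toList

-- ===== PORT A =====
-- the generator body for one word: count = Σ (ascii_lowercase.index(letter) + 1); none = ValueError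
def wordCount? (w : List Char) : Option Int :=
  w.foldl (fun acc c =>
    acc.bind (fun a =>
      match PySem.List.index? lowercaseChars c with
      | none => none
      | some i => some (a + (i : Int) + 1)))
    (some 0)

def execute (x : String) : String :=
  let col := (PySem.Chars.split? x.toList [' ']).getD []
  let res := col.foldl (fun st w =>
      st.bind (fun rc => (wordCount? w).map (fun cnt =>
        if cnt > rc.2 then (String.ofList w, cnt) else rc)))
    (some ("", (0 : Int)))
  (res.map Prod.fst).getD ""

-- ===== PORT B =====
def wordScore (w : List Char) : Int :=
  (w.map (fun c => ((PySem.List.index? lowercaseChars c).getD 0 : Int) + 1)).sum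

def execute_alt (x : String) : String :=
  let ws := (PySem.Chars.split? x.toList [' ']).getD []
  match PySem.List.sorted ws wordScore true with
  | [] => ""            -- unreachable: split(' ') never yields an empty list
  | w :: _ => String.ofList w

-- ===== PRECONDITION & SPEC =====
-- Pre_ excludes exactly the inputs containing a character other than a space or a
-- lowercase ASCII letter: on those A raises ValueError (string.ascii_lowercase.index).
def Pre_execute (x : String) : Prop :=
  (x.toList.all (fun c => c == ' ' || lowercaseChars.contains c)) = true
instance (x : String) : Decidable (Pre_execute x) := by unfold Pre_execute; infer_instance

def pvWitness_execute : String := "hello world"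

def Spec_execute (x : String) (out : String) : Prop := out = execute_alt x
instance (x : String) (out : String) : Decidable (Spec_execute x out) := by unfold Spec_execute; infer_instance

-- ===== CLAIM (what is proved, stated in full; the proofs are below) =====
def Claim_equal_execute : Prop := ∀ (x : String), Dom_execute x → Pre_execute x → Spec_execute x (execute x)

-- ===== LEMMAS AND PROOFS =====

-- each mapped term of wordScore is ≥ 1, so the score of a word bounds its length
lemma wordScore_ge_len (w : List Char) : (w.length : Int) ≤ wordScore w := by
  induction w with
  | nil => simp [wordScore]
  | cons c t ih =>
    simp only [wordScore, List.map_cons, List.sum_cons, List.length_cons] at *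
    have h0 : (0 : Int) ≤ ((PySem.List.index? lowercaseChars c).getD 0 : Int) := by
      cases h : PySem.List.index? lowercaseChars c <;> simp
    push_cast
    omega

lemma wordScore_nonpos_eq_nil (w : List Char) (h : wordScore w ≤ 0) : w = [] := by
  have := wordScore_ge_len w
  cases w with
  | nil => rfl
  | cons c t => exfalso; simp only [List.length_cons] at this; omega

-- on an all-lowercase word the generator's count is exactly wordScore
lemma wordCount?_eq_some (w : List Char) (h : ∀ c ∈ w, c ∈ lowercaseChars) :
    wordCount? w = some (wordScore w) := by
  suffices H : ∀ (a : Int),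
      w.foldl (fun acc c =>
        acc.bind (fun a =>
          match PySem.List.index? lowercaseChars c with
          | none => none
          | some i => some (a + (i : Int) + 1)))
        (some a) = some (a + wordScore w) by
    simpa [wordCount?] using H 0
  induction w with
  | nil => intro a; simp [wordScore]
  | cons c t ih =>
    intro a
    have hc : c ∈ lowercaseChars := h c (by simp)
    obtain ⟨i, hi⟩ := Option.isSome_iff_exists.mp
      ((PySem.List.index?_isSome_iff lowercaseChars c).mpr hc)
    have ht : ∀ c' ∈ t, c' ∈ lowercaseChars := fun c' hc' => h c' (by simp [hc'])
    simp only [List.foldl_cons, Option.bind_some, hi]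
    rw [ih ht]
    have hi' : List.idxOf? c lowercaseChars = some i := by
      simpa [PySem.List.index?] using hi
    simp [wordScore, hi']
    ring

-- the characters of every word produced by splitOn.go on a one-character separator
-- satisfy P, provided the pending pieces do and every remaining char is P or the separator
lemma splitOn_go_chars (P : Char → Prop) (sepc : Char) :
    ∀ (fuel : Nat) (l cur : List Char) (acc : List (List Char)),
      l.length < fuel →
      (∀ c ∈ cur, P c) →
      (∀ w ∈ acc, ∀ c ∈ w, P c) →
      (∀ c ∈ l, c = sepc ∨ P c) →
      ∀ w ∈ PySem.Chars.splitOn.go [sepc] fuel l cur acc, ∀ c ∈ w, P c := by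
  intro fuel
  induction fuel with
  | zero => intro l cur acc h; omega
  | succ fuel ih =>
    intro l cur acc hlen hcur hacc hl
    cases l with
    | nil =>
      intro w hw c hc
      simp only [PySem.Chars.splitOn.go, List.mem_reverse, List.mem_cons] at hw
      rcases hw with h | h
      · subst h; exact hcur c (by simpa using hc)
      · exact hacc w h c hc
    | cons ch rest =>
      rw [PySem.Chars.splitOn.go]
      split
      · -- separator prefix: ch = sepc, drop it
        have hdrop : List.drop (List.length [sepc]) (ch :: rest) = rest := by simp
        rw [hdrop]
        apply ih rest [] (cur.reverse :: acc)
        · simp only [List.length_cons] at hlen; omega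
        · intro d hd; simp at hd
        · intro w hw d hd
          rcases List.mem_cons.mp hw with h | h
          · subst h; exact hcur d (by simpa using hd)
          · exact hacc w h d hd
        · intro d hd; exact hl d (by simp [hd])
      · -- ch is an ordinary character: ch ≠ sepc so P ch
        rename_i hpre
        have hch : ch ≠ sepc := by
          intro h; subst h
          exact hpre (by simp [List.isPrefixOf])
        apply ih rest (ch :: cur) acc
        · simp only [List.length_cons] at hlen; omega
        · intro d hd
          rcases List.mem_cons.mp hd with h | h
          · rcases hl ch (by simp) with h' | h'
            · exact absurd h' hch
            · exact h.symm ▸ h'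
          · exact hcur d h
        · exact hacc
        · intro d hd; exact hl d (by simp [hd])

-- splitOn.go never returns the empty list
lemma splitOn_go_ne_nil (sep : List Char) :
    ∀ (fuel : Nat) (l cur : List Char) (acc : List (List Char)),
      PySem.Chars.splitOn.go sep fuel l cur acc ≠ [] := by
  intro fuel
  induction fuel with
  | zero => intro l cur acc; simp [PySem.Chars.splitOn.go]
  | succ fuel ih =>
    intro l cur acc
    cases l with
    | nil => simp [PySem.Chars.splitOn.go]
    | cons ch rest =>
      rw [PySem.Chars.splitOn.go]
      split
      · exact ih _ _ _
      · exact ih _ _ _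

-- A's Option-threaded loop over all-lowercase words is the plain running-max loop
lemma afold_eq (ws : List (List Char)) (h : ∀ w ∈ ws, ∀ c ∈ w, c ∈ lowercaseChars) :
    ∀ (p : String × Int),
      ws.foldl (fun st w =>
        st.bind (fun rc => (wordCount? w).map (fun cnt =>
          if cnt > rc.2 then (String.ofList w, cnt) else rc))) (some p)
      = some (ws.foldl (fun rc w =>
          if wordScore w > rc.2 then (String.ofList w, wordScore w) else rc) p) := by
  induction ws with
  | nil => intro p; simp
  | cons w t ih =>
    intro p
    have hw : wordCount? w = some (wordScore w) :=
      wordCount?_eq_some w (fun c hc => h w (by simp) c hc)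
    simp only [List.foldl_cons, Option.bind_some, hw, Option.map_some]
    exact ih (fun w' hw' c hc => h w' (by simp [hw']) c hc) _

-- a foldl of insertBy starting from a nonempty accumulator stays nonempty
lemma foldl_insertBy_ne_nil (l : List (List Char)) :
    ∀ (a : List (List Char)), a ≠ [] →
      l.foldl (fun acc x =>
        PySem.List.insertBy (fun a b => decide (wordScore b < wordScore a)) x acc) a ≠ [] := by
  induction l with
  | nil => intro a ha; simpa
  | cons y ys ihl =>
    intro a ha
    simp only [List.foldl_cons]
    apply ihl
    cases a with
    | nil => exact absurd rfl ha
    | cons z zs =>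
      simp only [PySem.List.insertBy]
      split <;> simp

-- the running-max pair tracks the head of the stable descending insertion sort
lemma fold_tracks_sort (ws : List (List Char)) :
    ∀ (acc : List (List Char)) (rc : String × Int),
      (acc = [] → rc = ("", 0)) →
      (∀ h t, acc = h :: t → rc = (String.ofList h, wordScore h)) →
      (let acc' := ws.foldl (fun acc x =>
          PySem.List.insertBy (fun a b => decide (wordScore b < wordScore a)) x acc) acc
       let rc' := ws.foldl (fun rc w =>
          if wordScore w > rc.2 then (String.ofList w, wordScore w) else rc) rc
       (acc' = [] → rc' = ("", 0)) ∧
       (∀ h t, acc' = h :: t → rc' = (String.ofList h, wordScore h))) := by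
  induction ws with
  | nil => intro acc rc h1 h2; exact ⟨h1, h2⟩
  | cons w t ih =>
    intro acc rc h1 h2
    simp only [List.foldl_cons]
    apply ih
    · -- insertBy never returns []
      intro hnil
      exfalso
      cases acc with
      | nil => simp [PySem.List.insertBy] at hnil
      | cons y ys =>
        simp only [PySem.List.insertBy] at hnil
        split at hnil <;> simp_all
    · intro h tl hins
      cases acc with
      | nil =>
        -- first word: insertBy w [] = [w]
        simp only [PySem.List.insertBy] at hins
        obtain ⟨h1e, -⟩ := List.cons_eq_cons.mp hins
        rw [h1 rfl, ← h1e]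
        by_cases hpos : wordScore w > 0
        · simp [hpos]
        · have hnil : w = [] := wordScore_nonpos_eq_nil w (by omega)
          subst hnil
          simp [wordScore]
      | cons y ys =>
        rw [h2 y ys rfl]
        simp only [PySem.List.insertBy] at hins
        by_cases hlt : wordScore y < wordScore w
        · simp only [hlt, decide_true, if_true] at hins
          obtain ⟨h1e, -⟩ := List.cons_eq_cons.mp hins
          rw [← h1e]
          simp [gt_iff_lt, hlt]
        · simp only [hlt, decide_false] at hins
          obtain ⟨h1e, -⟩ := List.cons_eq_cons.mp hins
          rw [← h1e]
          simp [gt_iff_lt, hlt]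

-- ===== VERDICT (by name: the statement is the Claim_ definition above) =====
theorem execute_spec : Claim_equal_execute := by
  intro x _ hpre
  unfold Spec_execute execute execute_alt
  simp only [PySem.Chars.split?, List.isEmpty_cons, Bool.false_eq_true, if_false,
    Option.getD_some]
  have hP : ∀ c ∈ x.toList, c = ' ' ∨ c ∈ lowercaseChars := by
    intro c hc
    have := List.all_eq_true.mp hpre c hc
    rcases Bool.or_eq_true_iff.mp this with h | h
    · left; exact (beq_iff_eq).mp h
    · right; simpa using h
  have hlow : ∀ w ∈ PySem.Chars.splitOn x.toList [' '], ∀ c ∈ w, c ∈ lowercaseChars := by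
    intro w hw
    exact splitOn_go_chars (fun c => c ∈ lowercaseChars) ' ' (x.toList.length + 1)
      x.toList [] [] (by omega) (by intro c hc; simp at hc) (by intro w hw; simp at hw)
      hP w (by rw [PySem.Chars.splitOn] at hw; exact hw)
  have hne : PySem.Chars.splitOn x.toList [' '] ≠ [] := by
    rw [PySem.Chars.splitOn]; exact splitOn_go_ne_nil [' '] _ _ _ _
  rw [afold_eq _ hlow]
  rw [PySem.List.sorted_rev_eq_foldl_insertBy]
  have hmain := fold_tracks_sort (PySem.Chars.splitOn x.toList [' ']) [] ("", 0)
      (fun _ => rfl) (by intro h t hc; cases hc)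
  simp only at hmain
  obtain ⟨hn, hc⟩ := hmain
  cases hacc : List.foldl (fun acc x =>
      PySem.List.insertBy (fun a b => decide (wordScore b < wordScore a)) x acc) []
      (PySem.Chars.splitOn x.toList [' ']) with
  | nil =>
    exfalso
    obtain ⟨w0, t0, hws0⟩ := List.exists_cons_of_ne_nil hne
    rw [hws0, List.foldl_cons] at hacc
    exact foldl_insertBy_ne_nil t0 _ (by simp [PySem.List.insertBy]) hacc
  | cons h t =>
    rw [hc h t hacc]
    simp
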